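-- pv_equiv track=rewrite | github.com/queelius/computational-explorations | src/adversarial_misc.py | has_mono_triangle
-- ===== SOURCE A (Python) =====
-- import math
-- from typing import Dict, List, Optional, Set, Tuple, Any
--
-- def has_mono_triangle(n: int, coloring: Dict[Tuple[int, int], int]) -> bool:
--     """Check if any coprime triangle in [n] is monochromatic."""
--     for i in range(1, n + 1):
--         for j in range(i + 1, n + 1):
--             if math.gcd(i, j) != 1:
--                 continue
--             for k in range(j + 1, n + 1):
--                 if math.gcd(i, k) == 1 and math.gcd(j, k) == 1:
--                     e1 = (i, j)
--                     e2 = (i, k)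
--                     e3 = (j, k)
--                     c1 = coloring.get(e1, -1)
--                     c2 = coloring.get(e2, -1)
--                     c3 = coloring.get(e3, -1)
--                     if c1 == c2 == c3 and c1 != -1:
--                         return True
--     return False
-- ===== SOURCE B (Python) =====
-- import math
--
-- def has_mono_triangle(n, coloring):
--     """Check if any coprime triangle in [n] is monochromatic.
--
--     Edge-driven: collect the valid coloured edges once, then look for two
--     edges sharing their lower endpoint whose closing edge has the same colour.
--     """
--     edges = [(a, b, c) for (a, b), c in coloring.items()
--              if 1 <= a < b <= n and math.gcd(a, b) == 1 and c != -1]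
--     for (i, j, c) in edges:
--         for (a, k, c2) in edges:
--             if a == i and j < k and c2 == c and math.gcd(j, k) == 1 \
--                and coloring.get((j, k), -1) == c:
--                 return True
--     return False
-- ===== Notes on version B (the rewrite author's own statement) =====
-- stated objective: alternative
-- what changed: Replaces A's triple loop over all vertex triples of [n] with an edge-driven search: the valid coloured edges are extracted from the dict once, then B looks for two same-coloured edges sharing their lower endpoint whose closing edge has the same colour.
import Mathlib
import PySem

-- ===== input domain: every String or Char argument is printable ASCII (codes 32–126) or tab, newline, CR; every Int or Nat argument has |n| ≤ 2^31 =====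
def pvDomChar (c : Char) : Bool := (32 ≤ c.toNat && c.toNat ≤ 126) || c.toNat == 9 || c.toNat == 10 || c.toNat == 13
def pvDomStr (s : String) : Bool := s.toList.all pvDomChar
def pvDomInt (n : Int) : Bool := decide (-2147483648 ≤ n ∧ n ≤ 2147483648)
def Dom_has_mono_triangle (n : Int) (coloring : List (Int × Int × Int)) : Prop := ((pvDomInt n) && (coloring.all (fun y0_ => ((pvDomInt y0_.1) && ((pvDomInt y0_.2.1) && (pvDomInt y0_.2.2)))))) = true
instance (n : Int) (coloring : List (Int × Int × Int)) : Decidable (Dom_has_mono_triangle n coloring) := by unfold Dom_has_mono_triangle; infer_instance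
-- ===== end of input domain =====

-- B replaces the O(n^3) triple loop over vertex triples by an edge-driven scan over the coloured edges (alternative decomposition, not claimed faster).

-- coloring.get((a, b), -1): the dict is an association list with first-match lookup; exact.
def pvLookup (coloring : List (Int × Int × Int)) (a b : Int) : Int :=
  match coloring.find? (fun e => e.1 == a && e.2.1 == b) with
  | some e => e.2.2
  | none => -1

-- ===== PORT A =====
def has_mono_triangle (n : Int) (coloring : List (Int × Int × Int)) : Bool :=
  (PySem.List.pyRange 1 (n + 1) 1).any (fun i =>
    (PySem.List.pyRange (i + 1) (n + 1) 1).any (fun j =>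
      if Int.gcd i j ≠ 1 then false
      else
        (PySem.List.pyRange (j + 1) (n + 1) 1).any (fun k =>
          if Int.gcd i k = 1 ∧ Int.gcd j k = 1 then
            let c1 := pvLookup coloring i j
            let c2 := pvLookup coloring i k
            let c3 := pvLookup coloring j k
            decide (c1 = c2 ∧ c2 = c3 ∧ c1 ≠ -1)
          else false)))

-- ===== PORT B =====
-- coloring.items(): a dict's keys are unique, so items() is the association list with
-- later duplicate keys dropped (first occurrence wins, matching first-match lookup); exact.
def pvItems : List (Int × Int × Int) → List (Int × Int × Int)
  | [] => []
  | e :: rest => e :: (pvItems rest).filter (fun e' => !(e'.1 == e.1 && e'.2.1 == e.2.1))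

def has_mono_triangle_alt (n : Int) (coloring : List (Int × Int × Int)) : Bool :=
  let edges := (pvItems coloring).filter (fun e =>
    decide (1 ≤ e.1) && decide (e.1 < e.2.1) && decide (e.2.1 ≤ n) &&
    (Int.gcd e.1 e.2.1 == 1) && (e.2.2 != -1))
  edges.any (fun e1 => edges.any (fun e2 =>
    (e2.1 == e1.1) && decide (e1.2.1 < e2.2.1) && (e2.2.2 == e1.2.2) &&
    (Int.gcd e1.2.1 e2.2.1 == 1) && (pvLookup coloring e1.2.1 e2.2.1 == e1.2.2)))

-- ===== PRECONDITION & SPEC =====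
def Spec_has_mono_triangle (n : Int) (coloring : List (Int × Int × Int)) (out : Bool) : Prop := out = has_mono_triangle_alt n coloring
instance (n : Int) (coloring : List (Int × Int × Int)) (out : Bool) : Decidable (Spec_has_mono_triangle n coloring out) := by unfold Spec_has_mono_triangle; infer_instance

-- ===== CLAIM (what is proved, stated in full; the proofs are below) =====
def Claim_equal_has_mono_triangle : Prop := ∀ (n : Int) (coloring : List (Int × Int × Int)), Dom_has_mono_triangle n coloring → Spec_has_mono_triangle n coloring (has_mono_triangle n coloring)

-- ===== LEMMAS AND PROOFS =====

-- A monochromatic coprime triangle: the common characterisation of both ports.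
def pvTri (n : Int) (L : List (Int × Int × Int)) (i j k : Int) : Prop :=
  1 ≤ i ∧ i < j ∧ j < k ∧ k ≤ n ∧
  Int.gcd i j = 1 ∧ Int.gcd i k = 1 ∧ Int.gcd j k = 1 ∧
  pvLookup L i j = pvLookup L i k ∧ pvLookup L i k = pvLookup L j k ∧
  pvLookup L i j ≠ -1

theorem ite_false_left_eq_true (c : Prop) [Decidable c] (b : Bool) :
    ((if c then false else b) = true) ↔ ¬c ∧ b = true := by
  split_ifs with h <;> simp [h]

theorem ite_false_right_eq_true (c : Prop) [Decidable c] (b : Bool) :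
    ((if c then b else false) = true) ↔ c ∧ b = true := by
  split_ifs with h <;> simp [h]

theorem mem_pvItems_iff (L : List (Int × Int × Int)) (x : Int × Int × Int) :
    x ∈ pvItems L ↔ L.find? (fun e => e.1 == x.1 && e.2.1 == x.2.1) = some x := by
  induction L with
  | nil => simp [pvItems]
  | cons e rest ih =>
    by_cases hk : (e.1 == x.1 && e.2.1 == x.2.1) = true
    · have hf : List.find? (fun e => e.1 == x.1 && e.2.1 == x.2.1) (e :: rest) = some e :=
        List.find?_cons_of_pos hk
      rw [hf]
      simp only [beq_iff_eq, Bool.and_eq_true] at hk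
      simp only [pvItems, List.mem_cons, List.mem_filter, Option.some_inj,
        Bool.not_eq_eq_eq_not, Bool.not_true, Bool.and_eq_false_iff, beq_eq_false_iff_ne]
      constructor
      · rintro (rfl | ⟨_, h⟩)
        · rfl
        · rcases h with h | h
          exacts [absurd hk.1.symm h, absurd hk.2.symm h]
      · intro h; exact Or.inl h.symm
    · have hf : List.find? (fun e => e.1 == x.1 && e.2.1 == x.2.1) (e :: rest) =
          List.find? (fun e => e.1 == x.1 && e.2.1 == x.2.1) rest :=
        List.find?_cons_of_neg (by simpa using hk)
      rw [hf]
      have hxe : x ≠ e := by rintro rfl; simp at hk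
      simp only [beq_iff_eq, Bool.and_eq_true, not_and] at hk
      simp only [pvItems, List.mem_cons, List.mem_filter, ih]
      constructor
      · rintro (rfl | ⟨h, _⟩)
        · exact absurd rfl hxe
        · exact h
      · intro h
        refine Or.inr ⟨h, ?_⟩
        have hq := List.find?_some h
        simp only [beq_iff_eq, Bool.and_eq_true] at hq
        simp only [Bool.not_eq_eq_eq_not, Bool.not_true, Bool.and_eq_false_iff,
          beq_eq_false_iff_ne]
        by_cases h1 : x.1 = e.1
        · exact Or.inr (fun hc => hk (h1 ▸ rfl) (hc ▸ rfl))
        · exact Or.inl h1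

theorem pvLookup_find (L : List (Int × Int × Int)) (a b c : Int)
    (h : pvLookup L a b = c) (hc : c ≠ -1) :
    L.find? (fun e => e.1 == a && e.2.1 == b) = some (a, b, c) := by
  unfold pvLookup at h
  cases hf : L.find? (fun e => e.1 == a && e.2.1 == b) with
  | none => rw [hf] at h; exact absurd h.symm hc
  | some e =>
    rw [hf] at h
    have hp := List.find?_some hf
    obtain ⟨x, y, z⟩ := e
    simp only [beq_iff_eq, Bool.and_eq_true] at hp
    simp only at h
    rw [hp.1, hp.2, h]

theorem find_pvLookup (L : List (Int × Int × Int)) (x : Int × Int × Int)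
    (h : L.find? (fun e => e.1 == x.1 && e.2.1 == x.2.1) = some x) :
    pvLookup L x.1 x.2.1 = x.2.2 := by
  simp [pvLookup, h]

theorem portA_iff (n : Int) (L : List (Int × Int × Int)) :
    has_mono_triangle n L = true ↔ ∃ i j k, pvTri n L i j k := by
  simp only [has_mono_triangle, List.any_eq_true, PySem.List.mem_pyRange_one,
    ite_false_left_eq_true, ite_false_right_eq_true, decide_eq_true_eq, not_not]
  unfold pvTri
  constructor
  · rintro ⟨i, ⟨hi1, _⟩, j, ⟨hj1, hj2⟩, hgij, k, ⟨hk1, hk2⟩, ⟨hgik, hgjk⟩, hc1, hc2, hc3⟩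
    exact ⟨i, j, k, hi1, by omega, by omega, by omega, hgij, hgik, hgjk, hc1, hc2, hc3⟩
  · rintro ⟨i, j, k, h1, h2, h3, h4, h5, h6, h7, h8, h9, h10⟩
    exact ⟨i, ⟨h1, by omega⟩, j, ⟨by omega, by omega⟩, h5, k, ⟨by omega, by omega⟩,
      ⟨h6, h7⟩, h8, h9, h10⟩

theorem portB_iff (n : Int) (L : List (Int × Int × Int)) :
    has_mono_triangle_alt n L = true ↔ ∃ i j k, pvTri n L i j k := by
  simp only [has_mono_triangle_alt, List.any_eq_true, List.mem_filter,
    Bool.and_eq_true, decide_eq_true_eq, beq_iff_eq, bne_iff_ne]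
  unfold pvTri
  constructor
  · rintro ⟨e1, ⟨hm1, ⟨⟨⟨hv1a, hv1b⟩, hv1c⟩, hv1g⟩, hv1n⟩,
      e2, ⟨hm2, ⟨⟨⟨hv2a, hv2b⟩, hv2c⟩, hv2g⟩, hv2n⟩, ⟨⟨⟨heq, hlt⟩, hcol⟩, hgjk⟩, hlook⟩
    have l1 := find_pvLookup L e1 ((mem_pvItems_iff L e1).mp hm1)
    have l2 := find_pvLookup L e2 ((mem_pvItems_iff L e2).mp hm2)
    refine ⟨e1.1, e1.2.1, e2.2.1, hv1a, hv1b, hlt, hv2c, hv1g, ?_, hgjk, ?_, ?_, ?_⟩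
    · rw [← heq]; exact hv2g
    · rw [l1, ← heq, l2, hcol]
    · rw [← heq, l2, hcol, hlook]
    · rw [l1]; exact hv1n
  · rintro ⟨i, j, k, h1, h2, h3, h4, h5, h6, h7, h8, h9, h10⟩
    have hjk : pvLookup L j k = pvLookup L i j := by rw [h8, h9]
    have f1 : L.find? (fun e => e.1 == i && e.2.1 == j) = some (i, j, pvLookup L i j) :=
      pvLookup_find L i j _ rfl h10
    have f2 : L.find? (fun e => e.1 == i && e.2.1 == k) = some (i, k, pvLookup L i j) :=
      pvLookup_find L i k _ h8.symm h10
    have hjn : j ≤ n := by omega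
    have hik : i < k := by omega
    refine ⟨(i, j, pvLookup L i j), ?_, (i, k, pvLookup L i j), ?_, ?_⟩
    · exact ⟨(mem_pvItems_iff L _).mpr f1, ⟨⟨⟨h1, h2⟩, hjn⟩, h5⟩, h10⟩
    · exact ⟨(mem_pvItems_iff L _).mpr f2, ⟨⟨⟨h1, hik⟩, h4⟩, h6⟩, h10⟩
    · exact ⟨⟨⟨⟨rfl, h3⟩, rfl⟩, h7⟩, hjk⟩

-- ===== VERDICT (by name: the statement is the Claim_ definition above) =====
theorem has_mono_triangle_spec : Claim_equal_has_mono_triangle := by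
  intro n coloring _
  unfold Spec_has_mono_triangle
  rw [Bool.eq_iff_iff, portA_iff, portB_iff]
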